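-- pv_equiv track=rewrite | github.com/damien13williams/obu-programming-public | Class Project/ui/app.py | get_game_status
-- ===== SOURCE A (Python) =====
-- def get_game_status(puzzles):
--     total = len(puzzles)
--     completed = 0
--
--     for puzzle in puzzles:
--         solution = puzzle.get("solution")
--         if solution is not None and solution != {}:
--             completed += 1
--
--     if completed == 0:
--         return "not_started"
--     elif completed < total:
--         return "in_progress"
--     else:
--         return "complete"
-- ===== SOURCE B (Python) =====
-- def get_game_status(puzzles):
--     # One-pass state machine over the puzzles; returns early once the
--     # status can no longer change ("in_progress" is absorbing).
--     state = None  # None = no puzzles seen yet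
--     for puzzle in puzzles:
--         solution = puzzle.get("solution")
--         filled = solution is not None and solution != {}
--         if state is None:
--             state = "complete" if filled else "not_started"
--         elif state == "complete":
--             if not filled:
--                 return "in_progress"
--         else:  # state == "not_started"
--             if filled:
--                 return "in_progress"
--     return state if state is not None else "not_started"
-- ===== Notes on version B (the rewrite author's own statement) =====
-- stated objective: alternative
-- what changed: Replaces A's full-scan integer count compared against len(puzzles) by a single-pass finite-state machine whose states are the answer strings, returning early ('in_progress' is absorbing) as soon as both a filled and an unfilled puzzle have been seen.
import Mathlib
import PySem

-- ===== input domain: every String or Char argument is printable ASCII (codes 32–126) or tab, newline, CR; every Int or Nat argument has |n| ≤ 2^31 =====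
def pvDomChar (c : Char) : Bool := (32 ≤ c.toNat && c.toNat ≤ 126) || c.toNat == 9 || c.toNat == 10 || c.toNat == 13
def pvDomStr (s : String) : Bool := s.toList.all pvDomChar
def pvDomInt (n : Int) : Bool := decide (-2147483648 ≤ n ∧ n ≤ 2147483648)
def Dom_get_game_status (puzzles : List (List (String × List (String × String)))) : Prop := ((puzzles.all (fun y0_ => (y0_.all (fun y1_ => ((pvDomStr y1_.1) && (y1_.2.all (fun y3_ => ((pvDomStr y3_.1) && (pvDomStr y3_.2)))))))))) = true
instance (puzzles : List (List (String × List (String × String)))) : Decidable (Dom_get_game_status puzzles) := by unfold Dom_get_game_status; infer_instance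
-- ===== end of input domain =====

-- ===== PORT A =====
-- B replaces A's count-then-compare by a one-pass state machine with early exit; same return value.
def get_game_status (puzzles : List (List (String × List (String × String)))) : String :=
  let total := puzzles.length
  let completed := puzzles.foldl (fun completed puzzle =>
    match (PySem.Dict.mk puzzle).get? "solution" with
    | some solution => if solution ≠ [] then completed + 1 else completed
    | none => completed) 0
  if completed = 0 then "not_started"
  else if completed < total then "in_progress"
  else "complete"

-- ===== PORT B =====
def pvFilled (puzzle : List (String × List (String × String))) : Bool :=
  match (PySem.Dict.mk puzzle).get? "solution" with
  | some solution => solution ≠ []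
  | none => false

-- the loop of Source B: state is None / "complete" / "not_started"; early return "in_progress"
def pvLoop : Option String → List (List (String × List (String × String))) → String
  | st, [] => st.getD "not_started"
  | st, p :: ps =>
    let filled := pvFilled p
    match st with
    | none => pvLoop (some (if filled then "complete" else "not_started")) ps
    | some s =>
      if s = "complete" then
        if !filled then "in_progress" else pvLoop (some s) ps
      else
        if filled then "in_progress" else pvLoop (some s) ps

def get_game_status_alt (puzzles : List (List (String × List (String × String)))) : String :=
  pvLoop none puzzles

-- ===== PRECONDITION & SPEC =====
def Spec_get_game_status (puzzles : List (List (String × List (String × String)))) (out : String) : Prop := out = get_game_status_alt puzzles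
instance (puzzles : List (List (String × List (String × String)))) (out : String) : Decidable (Spec_get_game_status puzzles out) := by unfold Spec_get_game_status; infer_instance

-- ===== CLAIM (what is proved, stated in full; the proofs are below) =====
def Claim_equal_get_game_status : Prop := ∀ (puzzles : List (List (String × List (String × String)))), Dom_get_game_status puzzles → Spec_get_game_status puzzles (get_game_status puzzles)

-- ===== LEMMAS AND PROOFS =====
lemma pv_step_eq (p : List (String × List (String × String))) (c : Nat) :
    (match (PySem.Dict.mk p).get? "solution" with
     | some solution => if solution ≠ [] then c + 1 else c
     | none => c) = if pvFilled p then c + 1 else c := by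
  unfold pvFilled
  cases (PySem.Dict.mk p).get? "solution" with
  | none => simp
  | some s => by_cases hs : s = [] <;> simp [hs]

lemma pv_foldl_count (puzzles : List (List (String × List (String × String)))) (c : Nat) :
    puzzles.foldl (fun completed puzzle =>
      match (PySem.Dict.mk puzzle).get? "solution" with
      | some solution => if solution ≠ [] then completed + 1 else completed
      | none => completed) c = c + puzzles.countP pvFilled := by
  have hf : (fun (completed : Nat) (puzzle : List (String × List (String × String))) =>
      match (PySem.Dict.mk puzzle).get? "solution" with
      | some solution => if solution ≠ [] then completed + 1 else completed
      | none => completed)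
      = (fun completed puzzle => if pvFilled puzzle then completed + 1 else completed) := by
    funext completed puzzle; exact pv_step_eq puzzle completed
  rw [hf]
  induction puzzles generalizing c with
  | nil => simp
  | cons p ps ih =>
    simp only [List.foldl_cons, List.countP_cons, ih]
    by_cases hp : pvFilled p <;> simp [hp] <;> omega
    

lemma pvLoop_complete (ps : List (List (String × List (String × String)))) :
    pvLoop (some "complete") ps = if ps.all pvFilled then "complete" else "in_progress" := by
  induction ps with
  | nil => simp [pvLoop]
  | cons p ps ih =>
    by_cases hp : pvFilled p <;> simp [pvLoop, hp, ih]

lemma pvLoop_notstarted (ps : List (List (String × List (String × String)))) :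
    pvLoop (some "not_started") ps = if ps.any pvFilled then "in_progress" else "not_started" := by
  induction ps with
  | nil => simp [pvLoop]
  | cons p ps ih =>
    by_cases hp : pvFilled p <;> simp [pvLoop, hp, ih]

lemma pvLoop_none (ps : List (List (String × List (String × String)))) :
    pvLoop none ps =
      if ps.any pvFilled then
        (if ps.all pvFilled then "complete" else "in_progress")
      else "not_started" := by
  cases ps with
  | nil => simp [pvLoop]
  | cons p ps =>
    by_cases hp : pvFilled p
    · simp [pvLoop, hp, pvLoop_complete]
    · simp [pvLoop, hp, pvLoop_notstarted]

-- ===== VERDICT (by name: the statement is the Claim_ definition above) =====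
theorem get_game_status_spec : Claim_equal_get_game_status := by
  intro puzzles _
  unfold Spec_get_game_status get_game_status get_game_status_alt
  simp only [pv_foldl_count, Nat.zero_add, pvLoop_none]
  have hle := List.countP_le_length (l := puzzles) (p := pvFilled)
  by_cases h0 : puzzles.countP pvFilled = 0
  · have hno : ¬ puzzles.any pvFilled = true := by
      simp only [List.countP_eq_zero] at h0
      intro hc
      rcases List.any_eq_true.mp hc with ⟨x, hx, hp⟩
      exact absurd hp (h0 x hx)
    simp [h0, hno]
  · have hany : puzzles.any pvFilled = true := by
      by_contra hn
      exact h0 (List.countP_eq_zero.mpr (fun a ha hpa =>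
        hn (List.any_eq_true.mpr ⟨a, ha, hpa⟩)))
    by_cases hlt : puzzles.countP pvFilled < puzzles.length
    · have hnall : ¬ puzzles.all pvFilled = true := by
        intro hall
        have := List.countP_eq_length.mpr (fun a ha => List.all_eq_true.mp hall a ha)
        omega
      simp [h0, hlt, hany, hnall]
    · have heq : puzzles.countP pvFilled = puzzles.length := by omega
      have hall : puzzles.all pvFilled = true := by
        apply List.all_eq_true.mpr
        intro a ha; exact List.countP_eq_length.mp heq a ha
      simp [h0, hlt, hany, hall]
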